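-- pv_equiv track=rewrite | github.com/kauwelab/pic | mutualInfo.py | makeDictionary
-- ===== SOURCE A (Python) =====
-- def makeDictionary(column):
-- 	"""
-- 	Makes a dictionary with the different protein residue types in a given position as the keys and a list of the indicies at which those residues ocur as the values.
--
-- 	Args:
-- 		column (list of char): A list (with a length equal to the number of species in the MSA's) of all residues found at a single certain position on one of the genes.
-- 			Each index in the list corresponds to the species on which the residue is found.
--
-- 	Return:
-- 		dicitonary (dictionary of char to list of int): A dictionary with all possible residues in a certain position as the keys and a list of the indicies from "column"
-- 			at which those residues occur as the values.
-- 	"""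
-- 	dictionary = {}
-- 	index = 0
-- 	for residue in column[:-1]:
-- 		if residue in dictionary:
-- 			dictionary[residue].append(index)
-- 		else:
-- 			dictionary[residue] = [index]
-- 		index += 1
-- 	return dictionary
-- ===== SOURCE B (Python) =====
-- def makeDictionary(column):
--     xs = column[:-1]
--     return {k: [i for i, r in enumerate(xs) if r == k] for k in dict.fromkeys(xs)}
-- ===== Notes on version B (the rewrite author's own statement) =====
-- stated objective: alternative
-- what changed: Replaces A's single incremental pass (membership branch, create-or-append, manual counter) by staged passes: dedup the residues in first-occurrence order (dict.fromkeys), then collect each distinct residue's indices with a separate filtering scan of enumerate(column[:-1]); this trades A's O(n) single pass for O(n*k) nested scans.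
import Mathlib
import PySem

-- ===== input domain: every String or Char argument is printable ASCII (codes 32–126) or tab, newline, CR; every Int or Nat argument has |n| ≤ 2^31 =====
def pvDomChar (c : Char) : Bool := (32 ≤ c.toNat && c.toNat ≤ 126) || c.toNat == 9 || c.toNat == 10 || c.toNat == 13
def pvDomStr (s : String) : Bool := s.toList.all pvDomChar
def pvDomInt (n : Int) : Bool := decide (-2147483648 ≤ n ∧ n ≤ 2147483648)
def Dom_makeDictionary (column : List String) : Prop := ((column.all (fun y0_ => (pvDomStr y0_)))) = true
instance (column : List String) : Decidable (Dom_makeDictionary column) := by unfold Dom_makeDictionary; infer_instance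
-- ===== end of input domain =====

-- B replaces A's single incremental dict-building pass by staged passes: dedup the residues in
-- first-occurrence order, then gather each residue's indices by a separate filtering scan; alternative decomposition, equal results.

-- ===== PORT A =====
def makeDictionary (column : List String) : List (String × List Int) :=
  let st := (PySem.List.slice column none (some (-1))).foldl
    (fun (st : PySem.Dict String (List Int) × Int) residue =>
      let dictionary := st.1
      let index := st.2
      let dictionary :=
        if dictionary.contains residue then
          dictionary.modify residue [] (fun v => v ++ [index])   -- dictionary[residue].append(index)
        else
          dictionary.insert residue [index]
      (dictionary, index + 1))
    (PySem.Dict.empty, 0)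
  st.1.items

-- ===== PORT B =====
def makeDictionary_alt (column : List String) : List (String × List Int) :=
  let xs := PySem.List.slice column none (some (-1))
  (PySem.List.dedup xs).map (fun k =>                             -- for k in dict.fromkeys(xs)
    (k, ((PySem.List.enumerate xs 0).filter (fun p => p.2 == k)).map (fun p => p.1)))  -- [i for i, r in enumerate(xs) if r == k]

-- ===== PRECONDITION & SPEC =====
def Spec_makeDictionary (column : List String) (out : List (String × List Int)) : Prop := out = makeDictionary_alt column
instance (column : List String) (out : List (String × List Int)) : Decidable (Spec_makeDictionary column out) := by unfold Spec_makeDictionary; infer_instance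

-- ===== CLAIM (what is proved, stated in full; the proofs are below) =====
def Claim_equal_makeDictionary : Prop := ∀ (column : List String), Dom_makeDictionary column → Spec_makeDictionary column (makeDictionary column)

-- ===== LEMMAS AND PROOFS =====

theorem step_eq_modify (d : PySem.Dict String (List Int)) (x : String) (i : Int) :
    (if d.contains x then d.modify x [] (fun v => v ++ [i]) else d.insert x [i])
      = d.modify x [] (fun v => v ++ [i]) := by
  by_cases h : d.contains x = true
  · simp [h]
  · simp only [Bool.not_eq_true] at h
    simp [h, PySem.Dict.modify, PySem.Dict.insert, PySem.Dict.getD_of_not_contains (h := h)]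

theorem foldA_aux (xs : List String) (d : PySem.Dict String (List Int)) (i : Int) :
    xs.foldl
      (fun (st : PySem.Dict String (List Int) × Int) residue =>
        (st.1.modify residue [] (fun v => v ++ [st.2]), st.2 + 1)) (d, i)
    = ((PySem.List.enumerate xs i).foldl
        (fun d p => d.modify p.2 [] (fun v => v ++ [p.1])) d, i + xs.length) := by
  induction xs generalizing d i with
  | nil => simp [PySem.List.enumerate_nil]
  | cons x xs ih =>
    simp only [List.foldl_cons, PySem.List.enumerate_cons, List.length_cons]
    have h2 : i + ((xs.length + 1 : Nat) : Int) = (i + 1) + xs.length := by push_cast; ring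
    rw [h2]
    exact ih _ _

theorem foldA_eq (xs : List String) (d : PySem.Dict String (List Int)) (i : Int) :
    xs.foldl
      (fun (st : PySem.Dict String (List Int) × Int) residue =>
        let dictionary := st.1
        let index := st.2
        let dictionary :=
          if dictionary.contains residue then
            dictionary.modify residue [] (fun v => v ++ [index])
          else
            dictionary.insert residue [index]
        (dictionary, index + 1)) (d, i)
    = ((PySem.List.enumerate xs i).foldl
        (fun d p => d.modify p.2 [] (fun v => v ++ [p.1])) d, i + xs.length) := by
  have hf : (fun (st : PySem.Dict String (List Int) × Int) residue =>
        let dictionary := st.1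
        let index := st.2
        let dictionary :=
          if dictionary.contains residue then
            dictionary.modify residue [] (fun v => v ++ [index])
          else
            dictionary.insert residue [index]
        (dictionary, index + 1))
      = (fun (st : PySem.Dict String (List Int) × Int) residue =>
        (st.1.modify residue [] (fun v => v ++ [st.2]), st.2 + 1)) := by
    funext st residue
    simp only [step_eq_modify]
  rw [hf]
  exact foldA_aux xs d i

theorem dict_items (xs : List String) :
    ((PySem.List.enumerate xs 0).foldl
        (fun d p => d.modify p.2 [] (fun v => v ++ [p.1])) PySem.Dict.empty).items
      = (PySem.List.dedup xs).map (fun k =>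
          (k, ((PySem.List.enumerate xs 0).filter (fun p => p.2 == k)).map (fun p => p.1))) := by
  set l := PySem.List.enumerate xs 0 with hl
  set D := l.foldl (fun d p => d.modify p.2 [] (fun v => v ++ [p.1])) PySem.Dict.empty with hD
  have hnd : D.keys.Nodup := by
    rw [hD]
    exact PySem.Dict.nodup_keys_foldl_modify_key l (fun p => p.2) [] (fun _ p => (fun v => v ++ [p.1])) _ (by simp)
  have hkeys : D.keys = PySem.List.dedup xs := by
    rw [hD]
    rw [PySem.Dict.keys_foldl_modify_key]
    have h2 : List.map Prod.snd l = xs := by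
      rw [hl]; exact PySem.List.map_snd_enumerate xs 0
    rw [h2, PySem.List.dedup_eq_ofList]
    rfl
  have hget : ∀ k, D.getD k [] = ((l.filter (fun p => p.2 == k)).map (fun p => p.1)) := by
    intro k
    have hswap : D = (l.map (fun p => (p.2, p.1))).foldl
        (fun d q => d.modify q.1 [] (fun v => v ++ [q.2])) PySem.Dict.empty := by
      rw [hD, List.foldl_map]
    rw [hswap, PySem.Dict.getD_foldl_modify_append]
    simp [List.filter_map, List.map_map, Function.comp_def, PySem.Dict.getD_empty]
  rw [PySem.Dict.items_eq_map_keys D hnd [], hkeys]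
  exact List.map_congr_left (fun k _ => by rw [hget k])

-- ===== VERDICT (by name: the statement is the Claim_ definition above) =====
theorem makeDictionary_spec : Claim_equal_makeDictionary := by
  intro column _
  unfold Spec_makeDictionary makeDictionary makeDictionary_alt
  simp only [foldA_eq, dict_items]
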